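-- pv_equiv track=rewrite | github.com/nebg-ship/190Group-Analytics-Dashboard | qb_sync_service/service.py | _account_path_prefixes
-- ===== SOURCE A (Python) =====
-- def _normalize_account_full_name_for_compare(value: str) -> str:
--     segments = [segment.strip() for segment in str(value or "").split(":") if segment.strip()]
--     if not segments:
--         return ""
--     return ":".join(segments)
--
-- def _account_path_prefixes(value: str) -> list[str]:
--     clean = _normalize_account_full_name_for_compare(value)
--     if not clean:
--         return []
--     parts = clean.split(":")
--     prefixes: list[str] = []
--     for index in range(len(parts)):
--         prefixes.append(":".join(parts[: index + 1]))
--     return prefixes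
-- ===== SOURCE B (Python) =====
-- def _account_path_prefixes(value: str) -> list[str]:
--     prefixes: list[str] = []
--     cur = ""
--     for segment in str(value or "").split(":"):
--         seg = segment.strip()
--         if seg:
--             cur = seg if not prefixes else cur + ":" + seg
--             prefixes.append(cur)
--     return prefixes
-- ===== Notes on version B (the rewrite author's own statement) =====
-- stated objective: simpler
-- what changed: B makes a single pass over the raw colon-split pieces keeping a running prefix accumulator, instead of A's normalize-join-resplit followed by rejoining parts[:i+1] from scratch for every index.
import Mathlib
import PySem

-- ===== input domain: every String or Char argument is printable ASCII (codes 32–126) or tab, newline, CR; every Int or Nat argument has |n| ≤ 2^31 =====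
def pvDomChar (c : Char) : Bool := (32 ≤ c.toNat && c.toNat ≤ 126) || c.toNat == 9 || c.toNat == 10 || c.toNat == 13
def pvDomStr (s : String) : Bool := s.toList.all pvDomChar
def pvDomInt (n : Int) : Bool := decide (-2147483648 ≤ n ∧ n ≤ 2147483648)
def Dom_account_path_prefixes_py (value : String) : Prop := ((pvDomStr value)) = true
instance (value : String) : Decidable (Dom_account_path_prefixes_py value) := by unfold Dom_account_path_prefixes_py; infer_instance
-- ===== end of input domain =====

-- B replaces A's normalize-join-resplit-and-rejoin-each-prefix scheme by one pass that keeps a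
-- running prefix accumulator (objective: simpler — no helper, no resplit, no per-index rejoin).

-- ===== PORT A =====
-- _normalize_account_full_name_for_compare; 'str(value or "")' on a str argument is the string itself
def pvNormalizeCompare (value : String) : String :=
  let segments := (((PySem.Str.split? value ":").getD []).map PySem.Str.strip).filter
    (fun s => s ≠ "")
  if segments = [] then "" else PySem.Str.join ":" segments

def account_path_prefixes_py (value : String) : List String :=
  let clean := pvNormalizeCompare value
  if clean = "" then []
  else
    let parts := (PySem.Str.split? clean ":").getD []
    -- for index in range(len(parts)): prefixes.append(":".join(parts[:index+1]))
    (PySem.List.pyRange 0 (parts.length : Int) 1).foldl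
      (fun acc i => acc ++ [PySem.Str.join ":" (PySem.List.slice parts none (some (i + 1)))]) []

-- ===== PORT B =====
-- loop body of Source B: strip the segment, skip if empty, otherwise extend the running prefix
-- ('cur + ":" + seg' ported as PySem.Str.join ":" [cur, seg], the same concatenation)
def pvStep (st : List String × String) (segment : String) : List String × String :=
  let seg := PySem.Str.strip segment
  if seg = "" then st
  else
    let cur := if st.1 = [] then seg else PySem.Str.join ":" [st.2, seg]
    (st.1 ++ [cur], cur)

def account_path_prefixes_py_alt (value : String) : List String :=
  (((PySem.Str.split? value ":").getD []).foldl pvStep ([], "")).1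

-- ===== PRECONDITION & SPEC =====
def Spec_account_path_prefixes_py (value : String) (out : List String) : Prop := out = account_path_prefixes_py_alt value
instance (value : String) (out : List String) : Decidable (Spec_account_path_prefixes_py value out) := by unfold Spec_account_path_prefixes_py; infer_instance

-- ===== CLAIM (what is proved, stated in full; the proofs are below) =====
def Claim_equal_account_path_prefixes_py : Prop := ∀ (value : String), Dom_account_path_prefixes_py value → Spec_account_path_prefixes_py value (account_path_prefixes_py value)

-- ===== LEMMAS AND PROOFS =====

-- structural model of Chars.splitOn with the single-character separator ':'
def pvSplit : List Char → List Char → List (List Char)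
  | [], cur => [cur.reverse]
  | c :: rest, cur => if c = ':' then cur.reverse :: pvSplit rest [] else pvSplit rest (c :: cur)

theorem pvGo_eq (fuel : Nat) : ∀ (l cur : List Char) (acc : List (List Char)), l.length < fuel →
    PySem.Chars.splitOn.go [':'] fuel l cur acc = acc.reverse ++ pvSplit l cur := by
  induction fuel with
  | zero => intro l cur acc h; omega
  | succ fuel ih =>
    intro l cur acc h
    cases l with
    | nil => rw [PySem.Chars.splitOn.go.eq_def]; simp [pvSplit]
    | cons c rest =>
      rw [PySem.Chars.splitOn.go.eq_def]
      by_cases hc : c = ':'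
      · subst hc
        simp only [List.isPrefixOf, BEq.rfl, Bool.true_and, if_pos]
        rw [ih _ _ _ (by simpa using Nat.lt_of_succ_lt_succ h)]
        simp [pvSplit]
      · have hpre : ([':'].isPrefixOf (c :: rest)) = false := by
          simp only [List.isPrefixOf, Bool.and_true]
          exact beq_eq_false_iff_ne.mpr (Ne.symm hc)
        simp only [hpre, Bool.false_eq_true, if_false]
        rw [ih _ _ _ (by simpa using Nat.lt_of_succ_lt_succ h)]
        simp [pvSplit, hc]

theorem pvSplitOn_colon (s : List Char) : PySem.Chars.splitOn s [':'] = pvSplit s [] := by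
  unfold PySem.Chars.splitOn
  rw [pvGo_eq (s.length + 1) s [] [] (by omega)]
  simp

theorem pvSplit_no_colon : ∀ (l cur : List Char), ':' ∉ cur → ∀ p ∈ pvSplit l cur, ':' ∉ p := by
  intro l
  induction l with
  | nil => intro cur hcur p hp; simp [pvSplit] at hp; subst hp; simpa using hcur
  | cons c rest ih =>
    intro cur hcur p hp
    by_cases hc : c = ':'
    · subst hc
      simp [pvSplit] at hp
      rcases hp with hp | hp
      · subst hp; simpa using hcur
      · exact ih [] (by simp) p hp
    · simp [pvSplit, hc] at hp
      exact ih (c :: cur) (by simp [hcur, Ne.symm hc]) p hp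

theorem pvStrip_no_colon {p : List Char} (h : ':' ∉ p) : ':' ∉ PySem.Chars.strip p := by
  intro hm
  apply h
  have h1 : PySem.Chars.strip p ⊆ p := by
    unfold PySem.Chars.strip PySem.Chars.rstrip PySem.Chars.lstrip
    intro x hx
    have := (List.dropWhile_sublist (l := (List.dropWhile PySem.Chars.isspace p).reverse)
      PySem.Chars.isspace).mem (List.mem_reverse.mp hx)
    exact (List.dropWhile_sublist PySem.Chars.isspace).mem (List.mem_reverse.mp this)
  exact h1 hm

theorem pvSplit_append : ∀ (a l cur : List Char), ':' ∉ a →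
    pvSplit (a ++ l) cur = pvSplit l (a.reverse ++ cur) := by
  intro a
  induction a with
  | nil => intro l cur _; simp
  | cons c a' ih =>
    intro l cur h
    have hc : c ≠ ':' := by intro hc; exact h (by simp [hc])
    have h' : ':' ∉ a' := fun hm => h (by simp [hm])
    simp only [List.cons_append, pvSplit, if_neg hc]
    rw [ih l (c :: cur) h']
    simp

theorem pvSplit_join : ∀ (segs : List (List Char)), segs ≠ [] → (∀ p ∈ segs, ':' ∉ p) →
    pvSplit (PySem.Chars.join [':'] segs) [] = segs := by
  intro segs
  induction segs with
  | nil => intro h; exact absurd rfl h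
  | cons s rest ih =>
    intro _ hnc
    cases rest with
    | nil =>
      rw [PySem.Chars.join_singleton]
      have : pvSplit (s ++ []) [] = pvSplit [] (s.reverse ++ []) :=
        pvSplit_append s [] [] (hnc s (by simp))
      simpa [pvSplit] using this
    | cons t rest' =>
      rw [PySem.Chars.join_cons_cons]
      have hs : ':' ∉ s := hnc s (by simp)
      have hassoc : s ++ [':'] ++ PySem.Chars.join [':'] (t :: rest')
           = s ++ (':' :: PySem.Chars.join [':'] (t :: rest')) := by simp
      rw [hassoc, pvSplit_append s _ [] hs]
      simp only [pvSplit, if_pos]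
      rw [ih (by simp) (fun p hp => hnc p (by simp [hp]))]
      simp

-- Chars-level: joining with the joined pair as head is joining the flattened list
theorem pvChars_join_join (x y : List Char) (L : List (List Char)) :
    PySem.Chars.join [':'] (PySem.Chars.join [':'] [x, y] :: L)
      = PySem.Chars.join [':'] (x :: y :: L) := by
  cases L with
  | nil => simp [PySem.Chars.join_cons_cons, PySem.Chars.join_singleton]
  | cons z L' => simp [PySem.Chars.join_cons_cons, PySem.Chars.join_singleton, List.append_assoc]

theorem pvStr_join_singleton (p : String) : PySem.Str.join ":" [p] = p := by
  simp [PySem.Str.join, PySem.Chars.join_singleton]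

theorem pvStr_join_join (a b : String) (l : List String) :
    PySem.Str.join ":" (PySem.Str.join ":" [a, b] :: l) = PySem.Str.join ":" (a :: b :: l) := by
  unfold PySem.Str.join
  congr 1
  rw [show (":" : String).toList = [':'] by simp]
  simp only [List.map_cons, List.map_nil, String.toList_ofList]
  exact pvChars_join_join a.toList b.toList (l.map String.toList)

-- the guarded step over raw pieces is the plain accumulate step over stripped nonempty segments
def pvAcc (st : List String × String) (seg : String) : List String × String :=
  let cur := if st.1 = [] then seg else PySem.Str.join ":" [st.2, seg]
  (st.1 ++ [cur], cur)

theorem pvFold_fuse : ∀ (pieces : List String) (st : List String × String),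
    pieces.foldl pvStep st
      = ((pieces.map PySem.Str.strip).filter (fun s => s ≠ "")).foldl pvAcc st := by
  intro pieces
  induction pieces with
  | nil => intro st; rfl
  | cons p pieces ih =>
    intro st
    by_cases hp : PySem.Str.strip p = ""
    · simp only [List.foldl_cons, List.map_cons, List.filter_cons]
      rw [show pvStep st p = st by simp [pvStep, hp]]
      simp [hp, ih]
    · simp only [List.foldl_cons, List.map_cons, List.filter_cons]
      rw [show pvStep st p = pvAcc st (PySem.Str.strip p) by simp [pvStep, pvAcc, hp]]
      simp [hp, ih]

theorem pvAcc_go : ∀ (rest acc : List String) (cur : String), acc ≠ [] →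
    (rest.foldl pvAcc (acc, cur)).1
      = acc ++ (List.range rest.length).map
          (fun n => PySem.Str.join ":" (cur :: rest.take (n + 1))) := by
  intro rest
  induction rest with
  | nil => intro acc cur _; simp
  | cons s rest' ih =>
    intro acc cur hacc
    have hstep : pvAcc (acc, cur) s
        = (acc ++ [PySem.Str.join ":" [cur, s]], PySem.Str.join ":" [cur, s]) := by
      simp [pvAcc, hacc]
    have hmap : (List.range (s :: rest').length).map
          (fun n => PySem.Str.join ":" (cur :: (s :: rest').take (n + 1)))
        = PySem.Str.join ":" [cur, s] :: (List.range rest'.length).map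
            (fun n => PySem.Str.join ":" (PySem.Str.join ":" [cur, s] :: rest'.take (n + 1))) := by
      rw [List.length_cons, List.range_succ_eq_map, List.map_cons, List.map_map]
      have htail : (List.range rest'.length).map
            ((fun n => PySem.Str.join ":" (cur :: (s :: rest').take (n + 1))) ∘ Nat.succ)
          = (List.range rest'.length).map
            (fun n => PySem.Str.join ":" (PySem.Str.join ":" [cur, s] :: rest'.take (n + 1))) := by
        apply List.map_congr_left
        intro n _
        simp only [Function.comp_apply, Nat.succ_eq_add_one, List.take_succ_cons]
        rw [← pvStr_join_join]
      rw [htail]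
      simp
    simp only [List.foldl_cons, hstep, hmap]
    rw [ih (acc ++ [PySem.Str.join ":" [cur, s]]) _ (by simp)]
    simp

theorem pvPyRange_zero (n : Nat) :
    PySem.List.pyRange 0 (n : Int) 1 = (List.range n).map (fun (k : Nat) => (k : Int)) := by
  have h1 : PySem.List.pyRange 0 (n : Int) 1
      = (List.range (if (0 : Int) < (n : Int)
          then (((n : Int) - 0 + 1 - 1) / 1).toNat else 0)).map (fun (k : Nat) => (0 : Int) + 1 * (k : Int)) := by
    unfold PySem.List.pyRange
    rw [if_neg (show ¬ (1 : Int) = 0 by norm_num)]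
    rw [if_pos (show (0 : Int) < 1 by norm_num)]
  rw [h1]
  have h2 : (if (0 : Int) < (n : Int)
      then (((n : Int) - 0 + 1 - 1) / 1).toNat else 0) = n := by
    split_ifs with h
    · have he : ((n : Int) - 0 + 1 - 1) = (n : Int) := by ring
      rw [he, Int.ediv_one, Int.toNat_natCast]
    · omega
  rw [h2]
  apply List.map_congr_left
  intro k _
  ring

-- A's loop produces the take-prefix joins
theorem pvA_loop (parts : List String) :
    (PySem.List.pyRange 0 (parts.length : Int) 1).foldl
      (fun acc i => acc ++ [PySem.Str.join ":" (PySem.List.slice parts none (some (i + 1)))]) []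
    = (List.range parts.length).map (fun n => PySem.Str.join ":" (parts.take (n + 1))) := by
  rw [PySem.List.foldl_append_singleton_eq_map, List.nil_append, pvPyRange_zero, List.map_map]
  apply List.map_congr_left
  intro n _
  simp only [Function.comp_apply]
  rw [show ((n : Int) + 1) = ((n + 1 : Nat) : Int) by push_cast; ring]
  rw [PySem.List.slice_to_natCast]

theorem pvJoin_ne_empty (s : String) (l : List String) (hs : s ≠ "") :
    PySem.Str.join ":" (s :: l) ≠ "" := by
  intro h
  have h2 : (PySem.Str.join ":" (s :: l)).toList = [] := by rw [h]; simp
  rw [PySem.Str.toList_join] at h2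
  have hsl : s.toList ≠ [] := by
    intro hh; apply hs; cases s; simp_all
  cases l with
  | nil => rw [List.map_cons, List.map_nil, PySem.Chars.join_singleton] at h2; exact hsl h2
  | cons t l' =>
    rw [List.map_cons, List.map_cons, PySem.Chars.join_cons_cons] at h2
    simp at h2

-- the whole function on an arbitrary list of nonempty colon-free segments
theorem pvMain (segs : List String) (hne : ∀ s ∈ segs, s ≠ "") (hnc : ∀ s ∈ segs, ':' ∉ s.toList) :
    (let clean := if segs = [] then "" else PySem.Str.join ":" segs
     if clean = "" then ([] : List String)
     else
       let parts := (PySem.Str.split? clean ":").getD []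
       (PySem.List.pyRange 0 (parts.length : Int) 1).foldl
         (fun acc i => acc ++ [PySem.Str.join ":" (PySem.List.slice parts none (some (i + 1)))]) [])
    = (segs.foldl pvAcc ([], "")).1 := by
  cases segs with
  | nil => simp
  | cons s0 rest =>
    have hs0 : s0 ≠ "" := hne s0 (by simp)
    have hclean : PySem.Str.join ":" (s0 :: rest) ≠ "" := pvJoin_ne_empty s0 rest hs0
    simp only [reduceCtorEq, ite_false]
    rw [if_neg (by simpa using hclean)]
    have hresplit : PySem.Str.split? (PySem.Str.join ":" (s0 :: rest)) ":" = some (s0 :: rest) := by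
      unfold PySem.Str.split? PySem.Chars.split?
      rw [show (":" : String).toList = [':'] by simp]
      rw [if_neg (by simp)]
      rw [pvSplitOn_colon, PySem.Str.toList_join]
      rw [show (":" : String).toList = [':'] by simp]
      rw [pvSplit_join ((s0 :: rest).map String.toList) (by simp)
        (by intro p hp; rcases List.mem_map.mp hp with ⟨q, hq, rfl⟩; exact hnc q hq)]
      simp [List.map_map, Function.comp_def]
    rw [hresplit]
    simp only [Option.getD_some]
    rw [pvA_loop]
    have hfirst : pvAcc ([], "") s0 = ([s0], s0) := by simp [pvAcc]
    simp only [List.foldl_cons, hfirst]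
    rw [pvAcc_go rest [s0] s0 (by simp)]
    have hmap2 : (List.range (s0 :: rest).length).map
          (fun n => PySem.Str.join ":" ((s0 :: rest).take (n + 1)))
        = s0 :: (List.range rest.length).map
            (fun n => PySem.Str.join ":" (s0 :: rest.take (n + 1))) := by
      rw [List.length_cons, List.range_succ_eq_map, List.map_cons, List.map_map]
      have htail : (List.range rest.length).map
            ((fun n => PySem.Str.join ":" ((s0 :: rest).take (n + 1))) ∘ Nat.succ)
          = (List.range rest.length).map
            (fun n => PySem.Str.join ":" (s0 :: rest.take (n + 1))) := by
        apply List.map_congr_left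
        intro n _
        simp [List.take_succ_cons]
      rw [htail]
      simp [pvStr_join_singleton]
    rw [hmap2]
    simp

-- ===== VERDICT (by name: the statement is the Claim_ definition above) =====
theorem account_path_prefixes_py_spec : Claim_equal_account_path_prefixes_py := by
  intro value _
  unfold Spec_account_path_prefixes_py account_path_prefixes_py account_path_prefixes_py_alt
    pvNormalizeCompare
  have hsplit : PySem.Str.split? value ":" = some ((pvSplit value.toList []).map String.ofList) := by
    unfold PySem.Str.split? PySem.Chars.split?
    rw [show (":" : String).toList = [':'] by simp]
    simp [pvSplitOn_colon]
  rw [hsplit]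
  simp only [Option.getD_some]
  rw [pvFold_fuse]
  have hne : ∀ s ∈ (((pvSplit value.toList []).map String.ofList).map PySem.Str.strip).filter
      (fun s => s ≠ ""), s ≠ "" := by
    intro s hs
    simpa using List.of_mem_filter hs
  have hnc : ∀ s ∈ (((pvSplit value.toList []).map String.ofList).map PySem.Str.strip).filter
      (fun s => s ≠ ""), ':' ∉ s.toList := by
    intro s hs
    have hsm := List.mem_of_mem_filter hs
    rcases List.mem_map.mp hsm with ⟨p, hp, rfl⟩
    rcases List.mem_map.mp hp with ⟨sp, hsp, rfl⟩
    rw [PySem.Str.toList_strip, String.toList_ofList]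
    exact pvStrip_no_colon (pvSplit_no_colon value.toList [] (by simp) sp hsp)
  exact pvMain _ hne hnc
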